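-- pv_equiv track=rewrite | github.com/hardikkgupta/csci5511 | scheduling/scheduling.py | matrix_build
-- ===== SOURCE A (Python) =====
-- def matrix_build(schedule_dict):
--     # Prepares a matrix with rows and columns of players and have entries as matches played between them
--     matchup_count = {player: {opponent: 0 for opponent in players if opponent != player} for player in schedule_dict.keys()}
--     def update_matchup_count(players_in_game):
--         for player1 in players_in_game:
--             for player2 in players_in_game:
--                 if player1 != player2:
--                     matchup_count[player1][player2] += 1
--     for week_game in schedule_dict.values():
--         for match in week_game:
--             update_matchup_count(match)
--     return matchup_count
--
-- players = ['A', 'B', 'C', 'D', 'E', 'F', 'G', 'H', 'I', 'J', 'K', 'L', 'M']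
-- ===== SOURCE B (Python) =====
-- players = ['A', 'B', 'C', 'D', 'E', 'F', 'G', 'H', 'I', 'J', 'K', 'L', 'M']
--
--
-- def matrix_build(schedule_dict):
--     # Pass 1: per match, tally player multiplicities once, then aggregate, for each
--     # ordered pair of DISTINCT players, the product of their multiplicities into one
--     # flat pair_total dict (a match contributes count(p1)*count(p2), never one event
--     # per pair of positions).
--     pair_total = {}
--     for week_game in schedule_dict.values():
--         for match in week_game:
--             mult = {}
--             for p in match:
--                 mult[p] = mult.get(p, 0) + 1
--             for p1, c1 in mult.items():
--                 for p2, c2 in mult.items():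
--                     if p1 != p2:
--                         pair_total[(p1, p2)] = pair_total.get((p1, p2), 0) + c1 * c2
--     # Pass 2: build the zero matrix, then apply the aggregated totals by direct
--     # indexing (an unknown player still raises KeyError here, as in A).
--     matchup_count = {player: {opponent: 0 for opponent in players if opponent != player}
--                      for player in schedule_dict}
--     for (p1, p2), c in pair_total.items():
--         matchup_count[p1][p2] += c
--     return matchup_count
-- ===== Notes on version B (the rewrite author's own statement) =====
-- stated objective: alternative
-- what changed: B tallies each match's player multiplicities once and aggregates ordered-pair totals as products of multiplicities into one flat pair_total dict (pass 1), then builds the zero matrix and applies those aggregated totals in a separate second pass, instead of A's in-place +1 increments of a pre-built nested dict for every ordered pair of positions of every match.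
import Mathlib
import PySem

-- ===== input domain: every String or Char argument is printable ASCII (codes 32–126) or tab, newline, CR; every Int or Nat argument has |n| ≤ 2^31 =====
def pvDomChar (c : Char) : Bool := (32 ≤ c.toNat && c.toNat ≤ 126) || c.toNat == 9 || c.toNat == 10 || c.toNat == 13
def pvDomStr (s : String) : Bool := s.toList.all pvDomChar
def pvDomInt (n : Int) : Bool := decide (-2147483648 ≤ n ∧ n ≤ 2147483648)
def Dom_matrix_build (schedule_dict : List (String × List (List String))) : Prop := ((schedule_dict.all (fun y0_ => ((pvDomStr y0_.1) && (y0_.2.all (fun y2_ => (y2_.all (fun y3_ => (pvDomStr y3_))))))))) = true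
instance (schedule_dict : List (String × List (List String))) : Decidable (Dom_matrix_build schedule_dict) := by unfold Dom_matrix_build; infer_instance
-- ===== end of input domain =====

-- B replaces A's one-increment-per-pair-of-positions counting by per-match multiplicity
-- tallies aggregated as count products into one flat pair-total dict, applied to the
-- zero matrix in a separate second pass (objective: alternative).
-- Equivalence is about the return value; neither version mutates its argument.

def pvPlayers : List String :=
  ["A", "B", "C", "D", "E", "F", "G", "H", "I", "J", "K", "L", "M"]

-- ===== PORT A =====
-- update_matchup_count: nested loops mutating matchup_count[player1][player2] += 1
def pvUpdateMatchupCount (mc : PySem.Dict String (PySem.Dict String Int))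
    (playersInGame : List String) : PySem.Dict String (PySem.Dict String Int) :=
  playersInGame.foldl (fun mc p1 =>
    playersInGame.foldl (fun mc p2 =>
      if p1 ≠ p2 then
        mc.modify p1 PySem.Dict.empty (fun row => row.modify p2 0 (· + 1))
      else mc) mc) mc

def matrix_build (schedule_dict : List (String × List (List String))) :
    List (String × List (String × Int)) :=
  -- matchup_count = {player: {opponent: 0 for opponent in players if opponent != player} for player in schedule_dict.keys()}
  let mc : PySem.Dict String (PySem.Dict String Int) :=
    schedule_dict.foldl (fun d p =>
      d.insert p.1
        (pvPlayers.foldl (fun row o => if o ≠ p.1 then row.insert o 0 else row)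
          PySem.Dict.empty)) PySem.Dict.empty
  -- for week_game in schedule_dict.values(): for match in week_game: update_matchup_count(match)
  let mc := schedule_dict.foldl (fun mc wk =>
    wk.2.foldl (fun mc m => pvUpdateMatchupCount mc m) mc) mc
  mc.items.map (fun p => (p.1, p.2.items))

-- ===== PORT B =====
def matrix_build_alt (schedule_dict : List (String × List (List String))) :
    List (String × List (String × Int)) :=
  -- Pass 1: per match tally multiplicities once, then aggregate the count products
  -- into one flat pair_total dict keyed by ordered pairs of distinct players
  let pairTotal : PySem.Dict (String × String) Int :=
    schedule_dict.foldl (fun pt wk =>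
      wk.2.foldl (fun pt m =>
        let mult : PySem.Dict String Int :=
          m.foldl (fun mu p => mu.insert p (mu.getD p 0 + 1)) PySem.Dict.empty
        mult.items.foldl (fun pt q1 =>
          mult.items.foldl (fun pt q2 =>
            if q1.1 ≠ q2.1 then
              pt.insert (q1.1, q2.1) (pt.getD (q1.1, q2.1) 0 + q1.2 * q2.2)
            else pt) pt) pt) pt) PySem.Dict.empty
  -- Pass 2: zero matrix, then apply the aggregated totals by direct indexing
  let mc : PySem.Dict String (PySem.Dict String Int) :=
    schedule_dict.foldl (fun d p =>
      d.insert p.1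
        (pvPlayers.foldl (fun row o => if o ≠ p.1 then row.insert o 0 else row)
          PySem.Dict.empty)) PySem.Dict.empty
  let mc := pairTotal.items.foldl (fun mc q =>
    mc.modify q.1.1 PySem.Dict.empty (fun row => row.modify q.1.2 0 (· + q.2))) mc
  mc.items.map (fun p => (p.1, p.2.items))

-- ===== PRECONDITION & SPEC =====
-- Pre_ requires (a) distinct keys — the association list encodes a Python dict, which
-- cannot have duplicate keys, so this excludes no input the Python function ever sees —
-- and (b) that every player of a match containing two distinct players is both a key of
-- schedule_dict and a member of the global players list: otherwise both A and B raise
-- KeyError (A while counting, B while applying the totals to the matrix).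
def Pre_matrix_build (schedule_dict : List (String × List (List String))) : Prop :=
  (schedule_dict.map (·.1)).Nodup ∧
  ∀ wk ∈ schedule_dict, ∀ m ∈ wk.2, (∃ x ∈ m, ∃ y ∈ m, x ≠ y) →
    ∀ p ∈ m, p ∈ schedule_dict.map (·.1) ∧ p ∈ pvPlayers

instance (schedule_dict : List (String × List (List String))) :
    Decidable (Pre_matrix_build schedule_dict) := by
  unfold Pre_matrix_build; infer_instance

def pvWitness_matrix_build : (List (String × List (List String))) :=
  [("A", [["A", "B"]]), ("B", [])]

def Spec_matrix_build (schedule_dict : List (String × List (List String)))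
    (out : List (String × List (String × Int))) : Prop :=
  out = matrix_build_alt schedule_dict

instance (schedule_dict : List (String × List (List String)))
    (out : List (String × List (String × Int))) :
    Decidable (Spec_matrix_build schedule_dict out) := by
  unfold Spec_matrix_build; infer_instance

-- ===== CLAIM (what is proved, stated in full; the proofs are below) =====
def Claim_equal_matrix_build : Prop :=
  ∀ (schedule_dict : List (String × List (List String))),
    Dom_matrix_build schedule_dict → Pre_matrix_build schedule_dict →
      Spec_matrix_build schedule_dict (matrix_build schedule_dict)

-- ===== LEMMAS AND PROOFS =====

-- ---- shared: the list of ordered (player1, player2) pairs A increments, per match ----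
def pvPairs (m : List String) : List (String × String) :=
  m.flatMap (fun p1 => m.filterMap (fun p2 => if p1 ≠ p2 then some (p1, p2) else none))

def pvEvents (sd : List (String × List (List String))) : List (String × String) :=
  sd.flatMap (fun wk => wk.2.flatMap pvPairs)

def pvStep (mc : PySem.Dict String (PySem.Dict String Int)) (e : String × String) :
    PySem.Dict String (PySem.Dict String Int) :=
  mc.modify e.1 PySem.Dict.empty (fun row => row.modify e.2 0 (· + 1))

-- ---- B side: weighted pair entries, per match and globally ----
def pvWPairs (m : List String) : List ((String × String) × Int) :=
  (PySem.Dict.counter m).items.flatMap (fun q1 =>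
    (PySem.Dict.counter m).items.filterMap (fun q2 =>
      if q1.1 ≠ q2.1 then some ((q1.1, q2.1), q1.2 * q2.2) else none))

def pvWEvents (sd : List (String × List (List String))) : List ((String × String) × Int) :=
  sd.flatMap (fun wk => wk.2.flatMap pvWPairs)

def pvWStep (pt : PySem.Dict (String × String) Int) (q : (String × String) × Int) :
    PySem.Dict (String × String) Int :=
  pt.insert q.1 (pt.getD q.1 0 + q.2)

def pvWApply (mc : PySem.Dict String (PySem.Dict String Int))
    (q : (String × String) × Int) : PySem.Dict String (PySem.Dict String Int) :=
  mc.modify q.1.1 PySem.Dict.empty (fun row => row.modify q.1.2 0 (· + q.2))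

def pvKeySum (L : List ((String × String) × Int)) (e : String × String) : Int :=
  (L.map (fun q => if q.1 = e then q.2 else 0)).sum

-- ---- generic fold-flattening lemmas ----
theorem pvFoldl_seg {α β γ : Type} (l : List α) (g : α → List β) (f : γ → β → γ)
    (init : γ) :
    l.foldl (fun c x => (g x).foldl f c) init = (l.flatMap g).foldl f init := by
  induction l generalizing init with
  | nil => rfl
  | cons a t ih => simp [List.foldl_append, ih]

theorem pvFoldl_if_step (m : List String) (p1 : String)
    (c : PySem.Dict String (PySem.Dict String Int)) :
    m.foldl (fun c p2 => if p1 ≠ p2 then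
        c.modify p1 PySem.Dict.empty (fun row => row.modify p2 0 (· + 1)) else c) c
    = (m.filterMap (fun p2 => if p1 ≠ p2 then some (p1, p2) else none)).foldl pvStep c := by
  induction m generalizing c with
  | nil => rfl
  | cons a t ih =>
    simp only [List.foldl_cons, List.filterMap_cons]
    by_cases h : p1 ≠ a
    · rw [if_pos h, if_pos h, List.foldl_cons, ih]; rfl
    · rw [if_neg h, if_neg h, ih]

theorem pvUpdate_eq (mc : PySem.Dict String (PySem.Dict String Int)) (m : List String) :
    pvUpdateMatchupCount mc m = (pvPairs m).foldl pvStep mc := by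
  unfold pvUpdateMatchupCount pvPairs
  simp only [pvFoldl_if_step]
  exact pvFoldl_seg m _ pvStep mc

theorem pvFoldl_if_wstep (I : List (String × Int)) (q1 : String × Int)
    (c : PySem.Dict (String × String) Int) :
    I.foldl (fun c q2 => if q1.1 ≠ q2.1 then
        c.insert (q1.1, q2.1) (c.getD (q1.1, q2.1) 0 + q1.2 * q2.2) else c) c
    = (I.filterMap (fun q2 => if q1.1 ≠ q2.1 then
        some ((q1.1, q2.1), q1.2 * q2.2) else none)).foldl pvWStep c := by
  induction I generalizing c with
  | nil => rfl
  | cons a t ih =>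
    simp only [List.foldl_cons, List.filterMap_cons]
    by_cases h : q1.1 ≠ a.1
    · rw [if_pos h, if_pos h, List.foldl_cons, ih]; rfl
    · rw [if_neg h, if_neg h, ih]

-- ---- the inner zero-row comprehension ----
theorem pvRowInit_eq (k : String) :
    pvPlayers.foldl (fun row o => if o ≠ k then row.insert o 0 else row) PySem.Dict.empty
    = PySem.Dict.mk ((pvPlayers.filter (fun o => o ≠ k)).map (fun o => (o, (0 : Int)))) := by
  have h : ∀ (l : List String) (c : PySem.Dict String Int),
      l.foldl (fun row o => if o ≠ k then row.insert o 0 else row) c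
      = (l.filter (fun o => o ≠ k)).foldl (fun row o => row.insert o 0) c := by
    intro l
    induction l with
    | nil => intro c; rfl
    | cons a t ih =>
      intro c
      by_cases hh : a ≠ k
      · have hf : List.filter (fun o => decide ¬(o = k)) (a :: t)
            = a :: List.filter (fun o => decide ¬(o = k)) t := by simp [hh]
        rw [List.foldl_cons, if_pos hh, hf, List.foldl_cons, ih]
      · have hf : List.filter (fun o => decide ¬(o = k)) (a :: t)
            = List.filter (fun o => decide ¬(o = k)) t := by simp [hh]
        rw [List.foldl_cons, if_neg hh, hf, ih]
  rw [h]
  apply PySem.Dict.ext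
  rw [show (fun (row : PySem.Dict String Int) (o : String) => row.insert o 0)
        = (fun (row : PySem.Dict String Int) (o : String) =>
            row.insert ((fun x => x) o) ((fun (_ : String) => (0 : Int)) o)) from rfl]
  rw [PySem.Dict.items_foldl_insert_fresh]
  · rfl
  · intro a _; rfl
  · simpa using (by decide : pvPlayers.Nodup).filter _

-- ---- counting: A's per-match pair counts are products of multiplicities ----
theorem pvSum_if_count (m : List String) (a : String) (C : Nat) :
    (m.map (fun x => if x = a then C else 0)).sum = m.count a * C := by
  induction m with
  | nil => simp
  | cons y t ih =>
    simp only [List.map_cons, List.sum_cons, ih, List.count_cons]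
    by_cases h : y = a
    · subst h; simp; ring
    · simp [h, Ne.symm h]

theorem pvCount_filterMap (m : List String) (p1 a b : String) :
    ((m.filterMap (fun p2 => if p1 ≠ p2 then some (p1, p2) else none)).count (a, b))
    = if p1 = a ∧ a ≠ b then m.count b else 0 := by
  induction m with
  | nil => simp
  | cons y t ih =>
    simp only [List.filterMap_cons]
    by_cases h : p1 ≠ y
    · rw [if_pos h]
      rw [List.count_cons, ih, List.count_cons]
      by_cases h1 : p1 = a <;> by_cases h2 : a ≠ b <;> by_cases h3 : y = b <;>
        simp [h1, h2, h3, Prod.ext_iff] <;>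
        (push_neg at h2; exact absurd (h1.trans (h2.trans h3.symm)) h)
    · rw [if_neg h]
      push_neg at h
      subst h
      rw [ih, List.count_cons]
      by_cases h1 : p1 = a <;> by_cases h2 : a ≠ b <;>
        simp [h1, h2]

theorem pvCount_flatMap {α β : Type} [BEq β] (l : List α) (g : α → List β) (b : β) :
    (l.flatMap g).count b = (l.map (fun x => (g x).count b)).sum := by
  induction l with
  | nil => simp
  | cons y t ih => simp [List.count_append, ih]

theorem pvPairs_count (m : List String) (a b : String) :
    (pvPairs m).count (a, b) = if a = b then 0 else m.count a * m.count b := by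
  unfold pvPairs
  rw [pvCount_flatMap]
  rw [List.map_congr_left (fun p1 _ => pvCount_filterMap m p1 a b)]
  by_cases hab : a = b
  · subst hab
    rw [List.map_congr_left (l := m)
      (f := fun p1 => if p1 = a ∧ a ≠ a then m.count a else 0) (g := fun _ => 0)
      (by intro x _; simp)]
    simp
  · rw [List.map_congr_left (l := m)
      (f := fun p1 => if p1 = a ∧ a ≠ b then m.count b else 0)
      (g := fun p1 => if p1 = a then m.count b else 0)
      (by intro x _; simp [hab]), if_neg hab]
    exact pvSum_if_count m a (m.count b)

-- ---- weighted key sums over pvWPairs equal A's pair counts ----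
theorem pvKeySum_append (L1 L2 : List ((String × String) × Int)) (e : String × String) :
    pvKeySum (L1 ++ L2) e = pvKeySum L1 e + pvKeySum L2 e := by
  simp [pvKeySum]

theorem pvKeySum_flatMap {α : Type} (l : List α) (g : α → List ((String × String) × Int))
    (e : String × String) :
    pvKeySum (l.flatMap g) e = (l.map (fun x => pvKeySum (g x) e)).sum := by
  induction l with
  | nil => simp [pvKeySum]
  | cons y t ih => simp [pvKeySum, List.flatMap_cons] at *; simp [ih]

theorem pvKeySum_inner (I : List (String × Int)) (q1 : String × Int) (a b : String) :
    pvKeySum (I.filterMap (fun q2 => if q1.1 ≠ q2.1 then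
        some ((q1.1, q2.1), q1.2 * q2.2) else none)) (a, b)
    = if q1.1 = a ∧ a ≠ b then (I.map (fun q2 => if q2.1 = b then q1.2 * q2.2 else 0)).sum
      else 0 := by
  induction I with
  | nil => simp [pvKeySum]
  | cons y t ih =>
    simp only [List.filterMap_cons, List.map_cons, List.sum_cons]
    by_cases h : q1.1 ≠ y.1
    · rw [if_pos h]
      simp only [pvKeySum, List.map_cons, List.sum_cons] at ih ⊢
      rw [ih]
      by_cases h1 : q1.1 = a <;> by_cases h2 : a ≠ b <;> by_cases h3 : y.1 = b <;>
        simp [h1, h2, h3, Prod.ext_iff] <;>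
        (push_neg at h2; exact absurd (h1.trans (h2.trans h3.symm)) h)
    · rw [if_neg h]
      push_neg at h
      rw [ih]
      by_cases h1 : q1.1 = a <;> by_cases h2 : a ≠ b <;> simp [h1, h2, ← h]

theorem pvSum_if_key (S : List String) (hnd : S.Nodup) (cnt : String → Int)
    (x : String) (g : Int → Int) :
    ((S.map (fun k => (k, cnt k))).map
      (fun q : String × Int => if q.1 = x then g q.2 else 0)).sum
    = if x ∈ S then g (cnt x) else 0 := by
  induction S with
  | nil => simp
  | cons y t ih =>
    obtain ⟨hy, ht⟩ := List.nodup_cons.mp hnd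
    simp only [List.map_cons, List.sum_cons, ih ht]
    by_cases h : y = x
    · subst h
      simp [hy]
    · have hxy : ¬ x = y := fun hh => h hh.symm
      by_cases hx : x ∈ t <;> simp [hx, hxy, h]

theorem pvWPairs_keySum (m : List String) (a b : String) :
    pvKeySum (pvWPairs m) (a, b) = ((pvPairs m).count (a, b) : Int) := by
  unfold pvWPairs
  rw [pvKeySum_flatMap, PySem.Dict.items_counter]
  have hnd : (PySem.Set.ofList m).Nodup := PySem.Set.nodup_ofList m
  by_cases hab : a = b
  · rw [List.map_congr_left (g := fun _ => (0 : Int)) (by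
      intro q1 _
      rw [pvKeySum_inner]
      simp [hab])]
    rw [pvPairs_count m a b, if_pos hab]
    refine Eq.trans ?_ (by simp : ((0:Nat):Int) = 0).symm
    exact List.sum_eq_zero (by intro x hx; simp only [List.mem_map] at hx; obtain ⟨k, _, rfl⟩ := hx; rfl)
  · rw [List.map_congr_left
      (g := fun q1 : String × Int => if q1.1 = a then q1.2 * (m.count b : Int) else 0) (by
      intro q1 _
      dsimp only
      rw [pvKeySum_inner]
      rw [pvSum_if_key _ hnd _ b (fun v => q1.2 * v)]
      by_cases h1 : q1.1 = a
      · rw [if_pos (And.intro h1 hab), if_pos h1]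
        by_cases hb : b ∈ PySem.Set.ofList m
        · rw [if_pos hb]
        · have hb' : b ∉ m := fun hh => hb ((PySem.Set.mem_ofList m b).mpr hh)
          rw [if_neg hb, List.count_eq_zero_of_not_mem hb']
          simp
      · rw [if_neg (fun hc => h1 hc.1), if_neg h1])]
    rw [pvSum_if_key _ hnd _ a (fun v => v * (m.count b : Int))]
    rw [pvPairs_count m a b, if_neg hab]
    by_cases ha : a ∈ PySem.Set.ofList m
    · simp [ha]
    · have ha' : a ∉ m := fun hh => ha ((PySem.Set.mem_ofList m a).mpr hh)
      simp [ha, List.count_eq_zero_of_not_mem ha']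

theorem pvWPairs_list_keySum (ws : List (List String)) (a b : String) :
    pvKeySum (ws.flatMap pvWPairs) (a, b) = ((ws.flatMap pvPairs).count (a, b) : Int) := by
  induction ws with
  | nil => simp [pvKeySum]
  | cons m t ih =>
    simp only [List.flatMap_cons]
    rw [pvKeySum_append, List.count_append, ih, pvWPairs_keySum]
    push_cast
    ring

theorem pvWEvents_keySum (sd : List (String × List (List String))) (a b : String) :
    pvKeySum (pvWEvents sd) (a, b) = ((pvEvents sd).count (a, b) : Int) := by
  unfold pvWEvents pvEvents
  induction sd with
  | nil => simp [pvKeySum]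
  | cons wk t ih =>
    simp only [List.flatMap_cons]
    rw [pvKeySum_append, List.count_append, ih, pvWPairs_list_keySum]
    push_cast
    ring

-- ---- the weighted-apply pass (B's pass 2) ----
theorem pvWApply_getD (L : List ((String × String) × Int))
    (mc : PySem.Dict String (PySem.Dict String Int)) (k o : String) :
    ((L.foldl pvWApply mc).getD k PySem.Dict.empty).getD o 0
    = (mc.getD k PySem.Dict.empty).getD o 0 + pvKeySum L (k, o) := by
  induction L generalizing mc with
  | nil => simp [pvKeySum]
  | cons q t ih =>
    simp only [List.foldl_cons, ih, pvKeySum, List.map_cons, List.sum_cons]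
    simp only [pvWApply, PySem.Dict.getD_modify]
    by_cases h1 : k = q.1.1 <;> by_cases h2 : o = q.1.2
    · simp [h1, h2, PySem.Dict.getD_modify, Prod.ext_iff]
      ring
    · simp [h1, h2, PySem.Dict.getD_modify, Prod.ext_iff]
      intro hx
      exact absurd hx.symm h2
    · simp [h1, h2, PySem.Dict.getD_modify, Prod.ext_iff]
      intro hx
      exact absurd hx.symm h1
    · simp [h1, h2, PySem.Dict.getD_modify, Prod.ext_iff]
      intro hx hy
      exact absurd hy.symm h2

theorem pvWApply_keys (L : List ((String × String) × Int))
    (mc : PySem.Dict String (PySem.Dict String Int))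
    (hE : ∀ q ∈ L, q.1.1 ∈ mc.keys) :
    (L.foldl pvWApply mc).keys = mc.keys := by
  induction L generalizing mc with
  | nil => rfl
  | cons q t ih =>
    have hk : (pvWApply mc q).keys = mc.keys := by
      have hc : mc.contains q.1.1 = true :=
        (PySem.Dict.contains_iff_mem_keys mc q.1.1).2 (hE q (by simp))
      simp [pvWApply, PySem.Dict.keys_modify, PySem.Dict.keys_insert_of_contains _ _ hc]
    simp only [List.foldl_cons]
    rw [ih (pvWApply mc q) (fun q' hq' => by rw [hk]; exact hE q' (by simp [hq']))]
    exact hk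

theorem pvWApply_row_keys (L : List ((String × String) × Int))
    (mc : PySem.Dict String (PySem.Dict String Int))
    (hE : ∀ q ∈ L, q.1.2 ∈ (mc.getD q.1.1 PySem.Dict.empty).keys) (k : String) :
    ((L.foldl pvWApply mc).getD k PySem.Dict.empty).keys
    = (mc.getD k PySem.Dict.empty).keys := by
  induction L generalizing mc with
  | nil => rfl
  | cons q t ih =>
    have hrow : ∀ k', ((pvWApply mc q).getD k' PySem.Dict.empty).keys
        = (mc.getD k' PySem.Dict.empty).keys := by
      intro k'
      simp only [pvWApply, PySem.Dict.getD_modify]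
      by_cases h : k' = q.1.1
      · have hc : (mc.getD q.1.1 PySem.Dict.empty).contains q.1.2 = true :=
          (PySem.Dict.contains_iff_mem_keys _ _).2 (hE q (by simp))
        rw [if_pos h, PySem.Dict.keys_modify,
            PySem.Dict.keys_insert_of_contains _ _ hc, h]
      · rw [if_neg h]
    simp only [List.foldl_cons]
    rw [ih (pvWApply mc q) (fun q' hq' => by rw [hrow]; exact hE q' (by simp [hq'])), hrow]

theorem pvWStep_keys_sub (L : List ((String × String) × Int))
    (d : PySem.Dict (String × String) Int) (k : String × String)
    (h : k ∈ (L.foldl pvWStep d).keys) : k ∈ d.keys ∨ k ∈ L.map Prod.fst := by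
  induction L generalizing d with
  | nil => exact Or.inl h
  | cons q t ih =>
    rcases ih (pvWStep d q) (by simpa using h) with hh | hh
    · rcases (PySem.Dict.mem_keys_insert _ _ _ _).1 hh with h1 | h1
      · exact Or.inr (by simp [h1])
      · exact Or.inl h1
    · exact Or.inr (by simp [hh])

theorem pvSumKey_not (I : List ((String × String) × Int)) (e : String × String)
    (h : ∀ q ∈ I, q.1 ≠ e) : pvKeySum I e = 0 := by
  induction I with
  | nil => rfl
  | cons q t ih =>
    simp only [pvKeySum, List.map_cons, List.sum_cons]
    rw [if_neg (h q (by simp))]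
    simpa [pvKeySum] using ih (fun q' hq' => h q' (by simp [hq']))

theorem pvSumKey_mem (I : List ((String × String) × Int))
    (hnd : (I.map Prod.fst).Nodup) (e : String × String) (v : Int)
    (hmem : (e, v) ∈ I) : pvKeySum I e = v := by
  induction I with
  | nil => simp at hmem
  | cons q t ih =>
    simp only [List.map_cons, List.nodup_cons] at hnd
    rcases List.mem_cons.1 hmem with h1 | h1
    · have h1' := h1.symm
      subst h1'
      have h0 : pvKeySum t e = 0 := pvSumKey_not t e (fun q' hq' hk =>
        hnd.1 (by rw [← hk]; exact List.mem_map.2 ⟨q', hq', rfl⟩))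
      simp only [pvKeySum, List.map_cons, List.sum_cons] at *
      simp [h0]
    · have hne : q.1 ≠ e := fun hk => hnd.1 (by rw [hk]; exact List.mem_map.2 ⟨(e, v), h1, rfl⟩)
      simp only [pvKeySum, List.map_cons, List.sum_cons]
      rw [if_neg hne]
      simpa [pvKeySum] using ih hnd.2 h1

theorem pvKeySum_items (d : PySem.Dict (String × String) Int)
    (hnd : d.keys.Nodup) (e : String × String) :
    pvKeySum d.items e = d.getD e 0 := by
  by_cases hc : d.contains e = true
  · have hs : (d.get? e).isSome = true := by
      rw [← PySem.Dict.contains_eq_isSome_get?]; exact hc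
    obtain ⟨v, hv⟩ := Option.isSome_iff_exists.mp hs
    have hmem := PySem.Dict.mem_items_of_get?_eq_some (d := d) hv
    rw [PySem.Dict.getD_of_get?_eq_some d 0 hv]
    exact pvSumKey_mem d.items hnd e v hmem
  · have hc' : d.contains e = false := by simpa using hc
    rw [PySem.Dict.getD_of_not_contains d 0 hc']
    refine pvSumKey_not d.items e (fun q hq hk => ?_)
    have hek : e ∈ d.keys := by
      rw [← hk]; exact PySem.Dict.mem_keys_of_mem_items (d := d) hq
    exact absurd ((PySem.Dict.contains_iff_mem_keys d e).2 hek) (by simp [hc'])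

-- ---- lookups in the all-zero row ----
theorem pvGetD_zero (l : List String) (o : String) :
    (PySem.Dict.mk (l.map (fun x => (x, (0 : Int))))).getD o 0 = 0 := by
  induction l with
  | nil => rfl
  | cons a t ih =>
    rw [PySem.Dict.getD_eq_get?_getD] at *
    simp only [List.map_cons, PySem.Dict.get?_mk_cons]
    by_cases h : (a == o) = true
    · simp [h]
    · simp only [h]
      simpa using ih

-- ---- range of A's events under Pre_ ----
theorem pvEvents_range (sd : List (String × List (List String)))
    (hpre : ∀ wk ∈ sd, ∀ m ∈ wk.2, (∃ x ∈ m, ∃ y ∈ m, x ≠ y) →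
      ∀ p ∈ m, p ∈ sd.map (·.1) ∧ p ∈ pvPlayers) :
    ∀ e ∈ pvEvents sd, e.1 ∈ sd.map (·.1) ∧ e.1 ∈ pvPlayers ∧
      e.2 ∈ sd.map (·.1) ∧ e.2 ∈ pvPlayers ∧ e.2 ≠ e.1 := by
  intro e he
  simp only [pvEvents, List.mem_flatMap] at he
  obtain ⟨wk, hwk, m, hm, hpair⟩ := he
  simp only [pvPairs, List.mem_flatMap, List.mem_filterMap] at hpair
  obtain ⟨p1, hp1, p2, hp2, hif⟩ := hpair
  by_cases hne : p1 ≠ p2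
  · rw [if_pos hne] at hif
    obtain ⟨he1, he2⟩ : e.1 = p1 ∧ e.2 = p2 := by
      cases hif; exact ⟨rfl, rfl⟩
    have hdist : ∃ x ∈ m, ∃ y ∈ m, x ≠ y := ⟨p1, hp1, p2, hp2, hne⟩
    have h1 := hpre wk hwk m hm hdist p1 hp1
    have h2 := hpre wk hwk m hm hdist p2 hp2
    exact ⟨he1 ▸ h1.1, he1 ▸ h1.2, he2 ▸ h2.1, he2 ▸ h2.2,
      by rw [he1, he2]; exact fun hh => hne hh.symm⟩
  · rw [if_neg hne] at hif; cases hif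

-- ---- range of B's weighted events under Pre_ ----
theorem pvWEvents_range (sd : List (String × List (List String)))
    (hpre : ∀ wk ∈ sd, ∀ m ∈ wk.2, (∃ x ∈ m, ∃ y ∈ m, x ≠ y) →
      ∀ p ∈ m, p ∈ sd.map (·.1) ∧ p ∈ pvPlayers) :
    ∀ q ∈ pvWEvents sd, q.1.1 ∈ sd.map (·.1) ∧ q.1.1 ∈ pvPlayers ∧
      q.1.2 ∈ sd.map (·.1) ∧ q.1.2 ∈ pvPlayers ∧ q.1.2 ≠ q.1.1 := by
  intro q hq
  simp only [pvWEvents, List.mem_flatMap] at hq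
  obtain ⟨wk, hwk, m, hm, hpair⟩ := hq
  simp only [pvWPairs, List.mem_flatMap, List.mem_filterMap] at hpair
  obtain ⟨q1, hq1, q2, hq2, hif⟩ := hpair
  have hmem : ∀ r : String × Int, r ∈ (PySem.Dict.counter m).items → r.1 ∈ m := by
    intro r hr
    have := PySem.Dict.mem_keys_of_mem_items (d := PySem.Dict.counter m) hr
    rw [PySem.Dict.keys_counter] at this
    exact (PySem.Set.mem_ofList m r.1).mp this
  by_cases hne : q1.1 ≠ q2.1
  · rw [if_pos hne] at hif
    obtain ⟨he1, he2⟩ : q.1.1 = q1.1 ∧ q.1.2 = q2.1 := by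
      cases hif; exact ⟨rfl, rfl⟩
    have hdist : ∃ x ∈ m, ∃ y ∈ m, x ≠ y := ⟨q1.1, hmem q1 hq1, q2.1, hmem q2 hq2, hne⟩
    have h1 := hpre wk hwk m hm hdist q1.1 (hmem q1 hq1)
    have h2 := hpre wk hwk m hm hdist q2.1 (hmem q2 hq2)
    exact ⟨he1 ▸ h1.1, he1 ▸ h1.2, he2 ▸ h2.1, he2 ▸ h2.2,
      by rw [he1, he2]; exact fun hh => hne hh.symm⟩
  · rw [if_neg hne] at hif; cases hif

-- ---- A's counting pass, entrywise ----
theorem pvStep_getD (E : List (String × String))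
    (mc : PySem.Dict String (PySem.Dict String Int)) (k o : String) :
    ((E.foldl pvStep mc).getD k PySem.Dict.empty).getD o 0
    = (mc.getD k PySem.Dict.empty).getD o 0 + E.count (k, o) := by
  induction E generalizing mc with
  | nil => simp
  | cons e t ih =>
    obtain ⟨e1, e2⟩ := e
    simp only [List.foldl_cons, ih, List.count_cons]
    simp only [pvStep, PySem.Dict.getD_modify]
    by_cases h1 : k = e1 <;> by_cases h2 : o = e2 <;>
      simp [h1, h2, PySem.Dict.getD_modify, Prod.ext_iff] <;> first | omega | (intro hx; exact absurd hx.symm (by assumption))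

theorem pvStep_keys (E : List (String × String))
    (mc : PySem.Dict String (PySem.Dict String Int))
    (hE : ∀ e ∈ E, e.1 ∈ mc.keys) :
    (E.foldl pvStep mc).keys = mc.keys := by
  induction E generalizing mc with
  | nil => rfl
  | cons e t ih =>
    have hk : (pvStep mc e).keys = mc.keys := by
      have hc : mc.contains e.1 = true :=
        (PySem.Dict.contains_iff_mem_keys mc e.1).2 (hE e (by simp))
      simp [pvStep, PySem.Dict.keys_modify, PySem.Dict.keys_insert_of_contains _ _ hc]
    simp only [List.foldl_cons]
    rw [ih (pvStep mc e) (fun e' he' => by rw [hk]; exact hE e' (by simp [he']))]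
    exact hk

theorem pvStep_row_keys (E : List (String × String))
    (mc : PySem.Dict String (PySem.Dict String Int))
    (hE : ∀ e ∈ E, e.2 ∈ (mc.getD e.1 PySem.Dict.empty).keys) (k : String) :
    ((E.foldl pvStep mc).getD k PySem.Dict.empty).keys
    = (mc.getD k PySem.Dict.empty).keys := by
  induction E generalizing mc with
  | nil => rfl
  | cons e t ih =>
    have hrow : ∀ k', ((pvStep mc e).getD k' PySem.Dict.empty).keys
        = (mc.getD k' PySem.Dict.empty).keys := by
      intro k'
      simp only [pvStep, PySem.Dict.getD_modify]
      by_cases h : k' = e.1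
      · have hc : (mc.getD e.1 PySem.Dict.empty).contains e.2 = true :=
          (PySem.Dict.contains_iff_mem_keys _ _).2 (hE e (by simp))
        rw [if_pos h, PySem.Dict.keys_modify,
            PySem.Dict.keys_insert_of_contains _ _ hc, h]
      · rw [if_neg h]
    simp only [List.foldl_cons]
    rw [ih (pvStep mc e) (fun e' he' => by rw [hrow]; exact hE e' (by simp [he'])), hrow]

theorem pvWFold_getD (L : List ((String × String) × Int))
    (d : PySem.Dict (String × String) Int) (e : String × String) :
    (L.foldl pvWStep d).getD e 0 = d.getD e 0 + pvKeySum L e := by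
  induction L generalizing d with
  | nil => simp [pvKeySum]
  | cons q t ih =>
    simp only [List.foldl_cons, ih, pvKeySum, List.map_cons, List.sum_cons]
    simp only [pvWStep, PySem.Dict.getD_insert]
    by_cases h : e = q.1
    · rw [if_pos h, if_pos h.symm, h]; ring
    · rw [if_neg h, if_neg (fun hh => h hh.symm)]; ring

-- ===== VERDICT (by name: the statement is the Claim_ definition above) =====
theorem matrix_build_spec : Claim_equal_matrix_build := by
  intro sd _ hpre
  obtain ⟨hnd, hC⟩ := hpre
  unfold Spec_matrix_build matrix_build matrix_build_alt
  dsimp only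
  -- flatten B's pass-1 loops into one fold over pvWEvents
  have hB : sd.foldl (fun pt wk =>
      wk.2.foldl (fun pt m =>
        let mult : PySem.Dict String Int :=
          m.foldl (fun mu p => mu.insert p (mu.getD p 0 + 1)) PySem.Dict.empty
        mult.items.foldl (fun pt q1 =>
          mult.items.foldl (fun pt q2 =>
            if q1.1 ≠ q2.1 then
              pt.insert (q1.1, q2.1) (pt.getD (q1.1, q2.1) 0 + q1.2 * q2.2)
            else pt) pt) pt) pt) PySem.Dict.empty
      = (pvWEvents sd).foldl pvWStep PySem.Dict.empty := by
    unfold pvWEvents pvWPairs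
    simp only [PySem.Dict.foldl_insert_getD_add_one_eq_counter]
    simp only [pvFoldl_if_wstep]
    simp only [pvFoldl_seg]
  rw [hB]
  -- flatten A's update loops into one fold over pvEvents
  have hA : sd.foldl (fun mc wk => wk.2.foldl (fun mc m => pvUpdateMatchupCount mc m) mc)
      (sd.foldl (fun d p =>
        d.insert p.1 (pvPlayers.foldl (fun row o => if o ≠ p.1 then row.insert o 0 else row)
          PySem.Dict.empty)) PySem.Dict.empty)
      = (pvEvents sd).foldl pvStep
        (sd.foldl (fun d p =>
          d.insert p.1 (pvPlayers.foldl (fun row o => if o ≠ p.1 then row.insert o 0 else row)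
            PySem.Dict.empty)) PySem.Dict.empty) := by
    unfold pvEvents
    simp only [pvUpdate_eq]
    simp only [pvFoldl_seg]
  rw [hA]
  -- name B's pass-2 step function
  rw [show (fun (mc : PySem.Dict String (PySem.Dict String Int))
        (q : (String × String) × Int) =>
        mc.modify q.1.1 PySem.Dict.empty (fun row => row.modify q.1.2 0 (· + q.2)))
      = pvWApply from rfl]
  set initD : PySem.Dict String (PySem.Dict String Int) := sd.foldl (fun d p =>
    d.insert p.1 (pvPlayers.foldl (fun row o => if o ≠ p.1 then row.insert o 0 else row)
      PySem.Dict.empty)) PySem.Dict.empty with hinit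
  -- characterise the initial matrix
  have hitems : initD.items = sd.map (fun p =>
      (p.1, PySem.Dict.mk ((pvPlayers.filter (fun o => o ≠ p.1)).map
        (fun o => (o, (0 : Int)))))) := by
    rw [hinit]
    rw [show (fun (d : PySem.Dict String (PySem.Dict String Int))
          (p : String × List (List String)) =>
          d.insert p.1 (pvPlayers.foldl (fun row o => if o ≠ p.1 then row.insert o 0 else row)
            PySem.Dict.empty))
        = (fun (d : PySem.Dict String (PySem.Dict String Int))
            (p : String × List (List String)) =>
            d.insert ((fun q : String × List (List String) => q.1) p)
              ((fun q : String × List (List String) =>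
                pvPlayers.foldl (fun row o => if o ≠ q.1 then row.insert o 0 else row)
                  PySem.Dict.empty) p)) from rfl]
    rw [PySem.Dict.items_foldl_insert_fresh _ _ _ _ (fun a _ => rfl) hnd,
      show (PySem.Dict.empty : PySem.Dict String (PySem.Dict String Int)).items = [] from rfl,
      List.nil_append]
    exact List.map_congr_left (fun p _ => by rw [pvRowInit_eq])
  have hkeys_init : initD.keys = sd.map (·.1) := by
    show initD.items.map (·.1) = _
    rw [hitems, List.map_map]
    rfl
  have hgetD_init : ∀ p ∈ sd, initD.getD p.1 PySem.Dict.empty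
      = PySem.Dict.mk ((pvPlayers.filter (fun o => o ≠ p.1)).map (fun o => (o, (0 : Int)))) := by
    intro p hp
    exact PySem.Dict.getD_of_mem_items initD
      (by rw [hitems]; exact List.mem_map.2 ⟨p, hp, rfl⟩)
      (by rw [hkeys_init]; exact hnd) _
  have hrange := pvEvents_range sd hC
  -- ===== A's final matrix =====
  set mcF := (pvEvents sd).foldl pvStep initD with hmcF
  have hkeysF : mcF.keys = sd.map (·.1) := by
    rw [hmcF, pvStep_keys _ _ (fun e he => by
      rw [hkeys_init]; exact (hrange e he).1), hkeys_init]
  have hrowkeysF : ∀ p ∈ sd, (mcF.getD p.1 PySem.Dict.empty).keys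
      = pvPlayers.filter (fun o => o ≠ p.1) := by
    intro p hp
    rw [hmcF, pvStep_row_keys _ _ (fun e he => by
        obtain ⟨h1k, h1p, h2k, h2p, hne⟩ := hrange e he
        obtain ⟨q, hq, hq1⟩ := List.mem_map.1 h1k
        rw [← hq1, hgetD_init q hq]
        simpa using ⟨h2p, hq1 ▸ hne⟩),
      hgetD_init p hp]
    simp [PySem.Dict.keys_mk, Function.comp_def]
  have hvalF : ∀ p ∈ sd, ∀ o : String,
      ((mcF.getD p.1 PySem.Dict.empty).getD o 0)
      = ((pvEvents sd).count (p.1, o) : Int) := by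
    intro p hp o
    rw [hmcF, pvStep_getD, hgetD_init p hp, pvGetD_zero, zero_add]
  -- ===== B's pair-total dict =====
  set ptF := (pvWEvents sd).foldl pvWStep PySem.Dict.empty with hptF
  have hptnd : ptF.keys.Nodup := by
    rw [hptF]
    exact PySem.Dict.nodup_keys_foldl_insert_key _ _ _ _ PySem.Dict.nodup_keys_empty
  have hptgetD : ∀ e : String × String, ptF.getD e 0 = ((pvEvents sd).count e : Int) := by
    intro e
    obtain ⟨a, b⟩ := e
    rw [hptF, pvWFold_getD, PySem.Dict.getD_empty, pvWEvents_keySum]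
    simp
  have hwrange := pvWEvents_range sd hC
  have hitemRange : ∀ q ∈ ptF.items, q.1.1 ∈ sd.map (·.1) ∧ q.1.1 ∈ pvPlayers ∧
      q.1.2 ∈ sd.map (·.1) ∧ q.1.2 ∈ pvPlayers ∧ q.1.2 ≠ q.1.1 := by
    intro q hq
    have hk := PySem.Dict.mem_keys_of_mem_items (d := ptF) hq
    rw [hptF] at hk
    rcases pvWStep_keys_sub _ _ _ hk with h | h
    · simp [PySem.Dict.keys_empty] at h
    · obtain ⟨w, hw, hwk⟩ := List.mem_map.1 h
      have hr := hwrange w hw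
      rw [hwk] at hr
      exact hr
  -- ===== B's final matrix =====
  set mcB := ptF.items.foldl pvWApply initD with hmcB
  have hkeysB : mcB.keys = sd.map (·.1) := by
    rw [hmcB, pvWApply_keys _ _ (fun q hq => by
      rw [hkeys_init]; exact (hitemRange q hq).1), hkeys_init]
  have hrowkeysB : ∀ p ∈ sd, (mcB.getD p.1 PySem.Dict.empty).keys
      = pvPlayers.filter (fun o => o ≠ p.1) := by
    intro p hp
    rw [hmcB, pvWApply_row_keys _ _ (fun q hq => by
        obtain ⟨h1k, h1p, h2k, h2p, hne⟩ := hitemRange q hq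
        obtain ⟨r, hr, hr1⟩ := List.mem_map.1 h1k
        rw [← hr1, hgetD_init r hr]
        simpa using ⟨h2p, hr1 ▸ hne⟩),
      hgetD_init p hp]
    simp [PySem.Dict.keys_mk, Function.comp_def]
  have hvalB : ∀ p ∈ sd, ∀ o : String,
      ((mcB.getD p.1 PySem.Dict.empty).getD o 0)
      = ((pvEvents sd).count (p.1, o) : Int) := by
    intro p hp o
    rw [hmcB, pvWApply_getD, hgetD_init p hp, pvGetD_zero, zero_add,
      pvKeySum_items ptF hptnd, hptgetD]
  -- ===== both sides are the same map over sd =====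
  rw [PySem.Dict.items_eq_map_keys mcF (hkeysF ▸ hnd) PySem.Dict.empty, hkeysF,
    PySem.Dict.items_eq_map_keys mcB (hkeysB ▸ hnd) PySem.Dict.empty, hkeysB]
  simp only [List.map_map]
  refine List.map_congr_left (fun p hp => ?_)
  simp only [Function.comp_apply]
  refine Prod.ext rfl ?_
  show (mcF.getD p.1 PySem.Dict.empty).items = (mcB.getD p.1 PySem.Dict.empty).items
  rw [PySem.Dict.items_eq_map_keys (mcF.getD p.1 PySem.Dict.empty)
      (by rw [hrowkeysF p hp]; simpa using ((by decide : pvPlayers.Nodup).filter _)) 0,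
    hrowkeysF p hp,
    PySem.Dict.items_eq_map_keys (mcB.getD p.1 PySem.Dict.empty)
      (by rw [hrowkeysB p hp]; simpa using ((by decide : pvPlayers.Nodup).filter _)) 0,
    hrowkeysB p hp]
  refine List.map_congr_left (fun o _ => ?_)
  rw [hvalF p hp o, hvalB p hp o]
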